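-- pv_equiv track=rewrite | github.com/protocol7/advent-of-code | 5/poly2.py | react
-- ===== SOURCE A (Python) =====
-- def match(c1, c2):
--     return c1 != c2 and c1.lower() == c2.lower()
--
-- def react(p):
--     i = 1;
--     while i < len(p):
--         if match(p[i-1], p[i]):
--             p = p[:(i-1)] + p[(i+1):]
--             i = max(i - 1, 1)
--         else:
--             i += 1
--
--     return p
-- ===== SOURCE B (Python) =====
-- def react(p):
--     stack = []
--     for c in p:
--         if stack and c != stack[-1] and c.lower() == stack[-1].lower():
--             stack.pop()
--         else:
--             stack.append(c)
--     return ''.join(stack)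
-- ===== Notes on version B (the rewrite author's own statement) =====
-- stated objective: faster
-- what changed: A repeatedly rescans with an index and re-slices the whole string on every reaction (quadratic on reaction-heavy input); B does one left-to-right pass keeping a stack, popping when the next character reacts with the top; intended as faster and measured so here (1.96x at n=262144), though the margin on reaction-light random inputs is closer to constant-factor.
import Mathlib
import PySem

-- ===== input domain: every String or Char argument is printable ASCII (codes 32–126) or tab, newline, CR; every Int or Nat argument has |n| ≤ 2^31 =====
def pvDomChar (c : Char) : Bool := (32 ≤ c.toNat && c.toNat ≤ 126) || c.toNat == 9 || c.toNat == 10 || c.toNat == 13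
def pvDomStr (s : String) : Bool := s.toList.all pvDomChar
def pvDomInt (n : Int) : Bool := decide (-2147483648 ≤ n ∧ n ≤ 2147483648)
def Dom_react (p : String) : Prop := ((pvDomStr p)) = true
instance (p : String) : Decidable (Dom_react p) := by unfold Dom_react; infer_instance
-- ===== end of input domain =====

-- B replaces A's index loop that re-slices the whole string on every reaction by a single
-- left-to-right pass with a stack; objective: faster (measured 1.96x at the largest timing size).

-- ===== PORT A =====
-- port of A's helper 'match'
def matchA (c1 c2 : Char) : Bool :=
  (c1 != c2) && (PySem.Chars.lower [c1] == PySem.Chars.lower [c2])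

-- A's while loop on the string's character list; i is A's index. The fuel argument only makes
-- the loop structurally total; the supplied fuel always suffices (proved below), so the guard
-- never fires on any input.
def reactLoop (fuel : Nat) (p : List Char) (i : Nat) : List Char :=
  match fuel with
  | 0 => p
  | fuel + 1 =>
    if i < p.length then
      if matchA (p.getD (i-1) 'a') (p.getD i 'a') then
        reactLoop fuel (p.take (i-1) ++ p.drop (i+1)) (max (i-1) 1)
      else
        reactLoop fuel p (i+1)
    else p

def react (p : String) : String := (reactLoop (2 * p.toList.length + 1) p.toList 1).asString

-- ===== PORT B =====
-- one iteration of B's for-loop; the stack is kept top-first (head = Python's stack[-1])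
def altStep (stack : List Char) (c : Char) : List Char :=
  match stack with
  | t :: ts =>
      if (c != t) && (PySem.Chars.lower [c] == PySem.Chars.lower [t]) then ts
      else c :: t :: ts
  | [] => [c]

def react_alt (p : String) : String :=
  ((p.toList.foldl altStep []).reverse).asString

-- ===== PRECONDITION & SPEC =====
def Spec_react (p : String) (out : String) : Prop := out = react_alt p
instance (p : String) (out : String) : Decidable (Spec_react p out) := by unfold Spec_react; infer_instance

-- ===== CLAIM (what is proved, stated in full; the proofs are below) =====
def Claim_equal_react : Prop := ∀ (p : String), Dom_react p → Spec_react p (react p)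

-- ===== LEMMAS AND PROOFS =====

theorem charToNatInj (a b : Char) (h : a.toNat = b.toNat) : a = b :=
  Char.ext (UInt32.toNat_inj.mp h)

theorem toNatOfNat (n : Nat) (h : n.isValidChar) : (Char.ofNat n).toNat = n := by
  unfold Char.ofNat
  split
  · rfl
  · contradiction

theorem isupper_bounds (c : Char) (h : PySem.Chars.isupper c = true) :
    65 ≤ c.toNat ∧ c.toNat ≤ 90 := by
  simp [PySem.Chars.isupper, Char.le_def] at h
  exact ⟨h.1, h.2⟩

theorem lowerChar_toNat (c : Char) :
    (PySem.Chars.lowerChar c).toNat =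
      if PySem.Chars.isupper c then c.toNat + 32 else c.toNat := by
  unfold PySem.Chars.lowerChar
  split
  · rename_i h
    have hb := isupper_bounds c h
    simp [toNatOfNat (c.toNat + 32) (by constructor; omega)]
  · simp

theorem matchA_iff (a b : Char) : matchA a b = true ↔
    a ≠ b ∧ PySem.Chars.lowerChar a = PySem.Chars.lowerChar b := by
  simp [matchA, PySem.Chars.lower]

theorem matchA_symm (a b : Char) (h : matchA a b = true) : matchA b a = true := by
  rw [matchA_iff] at *
  exact ⟨h.1.symm, h.2.symm⟩

-- in ASCII a character reacts with exactly one character (its case swap)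
theorem matchA_det (a b t : Char) (hab : matchA a b = true) (hat : matchA a t = true) : t = b := by
  rw [matchA_iff] at hab hat
  obtain ⟨hne1, hl1⟩ := hab
  obtain ⟨hne2, hl2⟩ := hat
  apply charToNatInj
  have e1 := congrArg Char.toNat hl1
  have e2 := congrArg Char.toNat hl2
  rw [lowerChar_toNat, lowerChar_toNat] at e1
  rw [lowerChar_toNat, lowerChar_toNat] at e2
  have n1 : a.toNat ≠ b.toNat := fun e => hne1 (charToNatInj a b e)
  have n2 : a.toNat ≠ t.toNat := fun e => hne2 (charToNatInj a t e)
  by_cases ua : PySem.Chars.isupper a = true <;>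
    by_cases ub : PySem.Chars.isupper b = true <;>
      by_cases ut : PySem.Chars.isupper t = true <;>
        simp only [ua, ub, ut, if_true, if_false, Bool.false_eq_true] at e1 e2 <;> omega

theorem altStep_eq (s : List Char) (c : Char) :
    altStep s c = match s with
      | t :: ts => if matchA c t then ts else c :: t :: ts
      | [] => [c] := rfl

-- no two adjacent characters react (the invariant of B's stack and of A's scanned prefix)
def NoM (a b : Char) : Prop := matchA a b = false

theorem altStep_good (s : List Char) (c : Char) (h : List.IsChain NoM s) :
    List.IsChain NoM (altStep s c) := by
  rw [altStep_eq]
  match s with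
  | [] => simp
  | t :: ts =>
    rcases Bool.eq_false_or_eq_true (matchA c t) with hm | hm
    · simp only [hm, if_true]; exact h.tail
    · simp only [hm, Bool.false_eq_true, if_false]
      rw [List.isChain_cons_cons]
      exact ⟨hm, h⟩

theorem foldl_good (l s : List Char) (h : List.IsChain NoM s) :
    List.IsChain NoM (List.foldl altStep s l) := by
  induction l generalizing s with
  | nil => exact h
  | cons c l ih => exact ih _ (altStep_good s c h)

-- feeding a reacting pair through B's step leaves a good stack unchanged
theorem cancel (s : List Char) (a b : Char) (hg : List.IsChain NoM s)
    (hm : matchA a b = true) : altStep (altStep s a) b = s := by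
  match s with
  | [] => simp [altStep_eq, matchA_symm a b hm]
  | t :: ts =>
    rcases Bool.eq_false_or_eq_true (matchA a t) with hat | hat
    · have htb : b = t := (matchA_det a b t hm hat).symm
      match ts with
      | [] => simp [altStep_eq, hat, htb]
      | t2 :: rest =>
        have h12 : matchA t t2 = false := (List.isChain_cons_cons.mp hg).1
        simp [altStep_eq, hat, htb, h12]
    · simp [altStep_eq, hat, matchA_symm a b hm]

-- deleting a reacting adjacent pair does not change B's result
theorem cancel_foldl (u v : List Char) (a b : Char) (hm : matchA a b = true) :
    List.foldl altStep [] (u ++ a :: b :: v) = List.foldl altStep [] (u ++ v) := by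
  rw [List.foldl_append, List.foldl_append]
  simp only [List.foldl_cons]
  rw [cancel _ a b (foldl_good u [] (by simp)) hm]

-- B leaves a fully reacted polymer unchanged
theorem irreducible (l s : List Char) (h : List.IsChain NoM (s.reverse ++ l)) :
    List.foldl altStep s l = l.reverse ++ s := by
  induction l generalizing s with
  | nil => simp
  | cons c l ih =>
    have hstep : altStep s c = c :: s := by
      match s with
      | [] => rfl
      | t :: ts =>
        have hm : matchA t c = false := by
          have h2 := (List.isChain_append.mp h).2.2
          simpa using h2 t (by simp) c (by simp)
        have hcf : matchA c t = false := by
          by_cases hc : matchA c t = true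
          · rw [matchA_symm c t hc] at hm; cases hm
          · exact Bool.eq_false_iff.mpr hc
        simp [altStep_eq, hcf]
    rw [List.foldl_cons, hstep]
    have hrec : List.IsChain NoM ((c :: s).reverse ++ l) := by
      simpa using h
    rw [ih (c :: s) hrec]
    simp

theorem isChain_take_one {R : Char → Char → Prop} (l : List Char) :
    List.IsChain R (l.take 1) := by
  cases l <;> simp

theorem split_at (p : List Char) (i : Nat) (h1 : 1 ≤ i) (h : i < p.length) :
    p = p.take (i-1) ++ (p[i-1]'(by omega)) :: (p[i]'h) :: p.drop (i+1) := by
  conv_lhs => rw [← List.take_append_drop (i-1) p]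
  congr 1
  rw [List.drop_eq_getElem_cons (by omega : i - 1 < p.length)]
  congr 1
  have : i - 1 + 1 = i := by omega
  rw [this, List.drop_eq_getElem_cons h]

-- main invariant: A's loop state always reduces to B's answer (fuel bounds the loop measure)
theorem reactLoop_eq : ∀ (fuel : Nat) (p : List Char) (i : Nat), 1 ≤ i →
    2 * p.length + 1 ≤ fuel + i →
    List.IsChain NoM (p.take i) →
    reactLoop fuel p i = (List.foldl altStep [] p).reverse := by
  intro fuel
  induction fuel with
  | zero =>
    intro p i h1 hf hc
    rw [List.take_of_length_le (by omega)] at hc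
    rw [reactLoop, irreducible p [] (by simpa using hc)]
    simp
  | succ fuel ih =>
    intro p i h1 hf hc
    rw [reactLoop]
    by_cases h : i < p.length
    · simp only [if_pos h]
      have hg1 : p.getD (i-1) 'a' = p[i-1]'(by omega) := List.getD_eq_getElem p 'a' (by omega)
      have hg2 : p.getD i 'a' = p[i]'h := List.getD_eq_getElem p 'a' h
      rcases Bool.eq_false_or_eq_true (matchA (p.getD (i-1) 'a') (p.getD i 'a')) with hm | hm
      · -- reaction: drop the pair, step back
        simp only [hm, if_true]
        rw [hg1, hg2] at hm
        have hfold : List.foldl altStep [] p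
            = List.foldl altStep [] (p.take (i-1) ++ p.drop (i+1)) := by
          conv_lhs => rw [split_at p i h1 h]
          exact cancel_foldl _ _ _ _ hm
        rw [ih _ _ (by omega) (by simp only [List.length_append, List.length_take, List.length_drop]; omega) ?_]
        · rw [hfold]
        · rcases Nat.lt_or_ge i 2 with hi | hi
          · have hmx : max (i-1) 1 = 1 := by omega
            rw [hmx]; exact isChain_take_one _
          · have hmx : max (i-1) 1 = i - 1 := by omega
            rw [hmx, List.take_left' (by simp; omega)]
            apply hc.prefix
            have := List.take_prefix (i-1) (p.take i)
            rwa [List.take_take, Nat.min_eq_left (by omega)] at this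
      · -- no reaction: advance
        simp only [hm, Bool.false_eq_true, if_false]
        rw [hg1, hg2] at hm
        apply ih _ _ (by omega) (by omega)
        rw [List.take_add_one]
        have hge : p[i]? = some (p[i]'h) := List.getElem?_eq_getElem h
        rw [hge, List.isChain_append]
        refine ⟨hc, by simp, ?_⟩
        intro x hx y hy
        have hlen : (p.take i).length = i := by simp; omega
        have hlast : (p.take i).getLast? = some (p[i-1]'(by omega)) := by
          rw [List.getLast?_eq_getElem?, hlen, List.getElem?_take]
          simp only [if_pos (by omega : i - 1 < i)]
          exact List.getElem?_eq_getElem (by omega)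
        rw [hlast] at hx
        simp only [Option.mem_some_iff] at hx
        simp only [Option.toList_some, List.head?_cons, Option.mem_some_iff] at hy
        subst hx; subst hy
        exact hm
    · simp only [if_neg h]
      rw [List.take_of_length_le (by omega)] at hc
      rw [irreducible p [] (by simpa using hc)]
      simp

-- ===== VERDICT (by name: the statement is the Claim_ definition above) =====
theorem react_spec : Claim_equal_react := by
  intro p _
  unfold Spec_react react react_alt
  exact congrArg List.asString (reactLoop_eq _ p.toList 1 (le_refl 1) (by omega) (isChain_take_one _))
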